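-- pv_equiv track=rewrite | github.com/Bibas08/bibas-2626 | day3.py | encode_secret_word
-- ===== SOURCE A (Python) =====
-- def encode_secret_word(word):
--
--     vowels = 'aeiouAEIOU'
--     replaced = ''.join(['*' if char in vowels else char for char in word])
--
--  # Step 2: Reverse the string
--     reversed_str = replaced[::-1]
--
--
--     encoded = ''
--     for char in reversed_str:
--         if char.isalpha():
--
--             base = ord('A') if char.isupper() else ord('a')
--             shifted = chr((ord(char) - base + 2) % 26 + base)
--             encoded += shifted
--         else:
--             encoded += char
--
--
--     return encoded
-- ===== SOURCE B (Python) =====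
-- def encode_secret_word(word):
--     # Single pass over reversed(word): vowel -> '*', letter -> shift by 2, else unchanged.
--     out = []
--     for ch in reversed(word):
--         if ch in 'aeiouAEIOU':
--             out.append('*')
--         elif ch.isalpha():
--             base = ord('A') if ch.isupper() else ord('a')
--             out.append(chr((ord(ch) - base + 2) % 26 + base))
--         else:
--             out.append(ch)
--     return ''.join(out)
-- ===== Notes on version B (the rewrite author's own statement) =====
-- stated objective: simpler
-- what changed: One pass over the reversed word emitting each output character directly (vowel test first, then the alpha shift), instead of three staged passes building two intermediate strings.
import Mathlib
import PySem

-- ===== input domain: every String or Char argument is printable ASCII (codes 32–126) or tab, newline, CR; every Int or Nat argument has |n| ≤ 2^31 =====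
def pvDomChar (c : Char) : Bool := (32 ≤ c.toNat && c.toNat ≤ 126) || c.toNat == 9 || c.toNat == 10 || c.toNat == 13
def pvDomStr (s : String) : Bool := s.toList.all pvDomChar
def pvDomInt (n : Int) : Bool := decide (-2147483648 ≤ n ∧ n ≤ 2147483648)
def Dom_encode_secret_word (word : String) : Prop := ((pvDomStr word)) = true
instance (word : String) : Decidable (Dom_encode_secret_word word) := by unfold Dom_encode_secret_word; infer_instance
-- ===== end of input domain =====

-- B replaces A's three staged passes (replace vowels, reverse, shift loop with += concatenation)
-- by a single per-character pass over the reversed character list (objective: simpler).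

-- ===== PORT A =====
-- the body of A's shift loop: isalpha → shift by 2 within the case's alphabet, else unchanged
-- ('char.isupper()' ported as 'A' ≤ c ≤ 'Z': exact on ASCII letters, which is where it is evaluated on Dom)
def pvShiftA (c : Char) : Char :=
  if PySem.Chars.strIsalpha [c] then
    let base : Nat := if 'A' ≤ c ∧ c ≤ 'Z' then 'A'.toNat else 'a'.toNat
    Char.ofNat ((c.toNat - base + 2) % 26 + base)
  else c

def encode_secret_word (word : String) : String :=
  let vowels := "aeiouAEIOU".toList
  let replaced := word.toList.map (fun c => if c ∈ vowels then '*' else c)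
  let reversed_str := (PySem.List.slice? replaced none none (-1)).getD []  -- replaced[::-1]; step -1 ≠ 0, never none
  String.ofList (reversed_str.foldl (fun acc c => acc ++ [pvShiftA c]) [])

-- ===== PORT B =====
-- B's loop body: vowel test first, then alpha/shift, else unchanged
def pvEmitB (c : Char) : Char :=
  if c ∈ "aeiouAEIOU".toList then '*'
  else if PySem.Chars.strIsalpha [c] then
    let base : Nat := if 'A' ≤ c ∧ c ≤ 'Z' then 'A'.toNat else 'a'.toNat
    Char.ofNat ((c.toNat - base + 2) % 26 + base)
  else c

-- B appends one output character per input character (out.append + join): output built front-to-back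
def pvEncB : List Char → List Char
  | [] => []
  | c :: rest => pvEmitB c :: pvEncB rest

def encode_secret_word_alt (word : String) : String :=
  String.ofList (pvEncB word.toList.reverse)

-- ===== PRECONDITION & SPEC =====
def Spec_encode_secret_word (word : String) (out : String) : Prop := out = encode_secret_word_alt word
instance (word : String) (out : String) : Decidable (Spec_encode_secret_word word out) := by unfold Spec_encode_secret_word; infer_instance

-- ===== CLAIM (what is proved, stated in full; the proofs are below) =====
def Claim_equal_encode_secret_word : Prop := ∀ (word : String), Dom_encode_secret_word word → Spec_encode_secret_word word (encode_secret_word word)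

-- ===== LEMMAS AND PROOFS =====
theorem pvEncB_eq_map (l : List Char) : pvEncB l = l.map pvEmitB := by
  induction l with
  | nil => rfl
  | cons c rest ih => simp [pvEncB, ih]

theorem pvEmitB_eq (c : Char) :
    pvShiftA (if c ∈ "aeiouAEIOU".toList then '*' else c) = pvEmitB c := by
  by_cases h : c ∈ "aeiouAEIOU".toList
  · rw [if_pos h]
    unfold pvEmitB
    rw [if_pos h]
    decide
  · rw [if_neg h]
    unfold pvEmitB
    rw [if_neg h]
    rfl

-- ===== VERDICT (by name: the statement is the Claim_ definition above) =====
theorem encode_secret_word_spec : Claim_equal_encode_secret_word := by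
  intro word _
  unfold Spec_encode_secret_word encode_secret_word encode_secret_word_alt
  simp only [PySem.List.slice?_none_none_neg_one, Option.getD_some,
    PySem.List.foldl_append_singleton_eq_map, pvEncB_eq_map, ← List.map_reverse, List.map_map]
  congr 1
  apply List.map_congr_left
  intro c _
  exact pvEmitB_eq c
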